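-- pv_equiv track=rewrite | github.com/johnsamuelwrites/mlscores | mlscores/scores.py | get_properties_without_translations
-- ===== SOURCE A (Python) =====
-- def get_properties_without_translations(properties):
--     """
--     Find properties that do not have translations in all languages.
--
--     This function takes a list of properties with their corresponding languages and returns a dictionary
--     where the keys are the languages and the values are the properties that do not have translations in those languages.
--
--     Args:
--         properties (list): A list of tuples containing the property, its value, and its language.
--
--     Returns:
--         A dictionary where the keys are the languages and the values are the properties that do not have translations in those languages.
--     """
--     # Get all languages from the properties
--     languages = set(lang for _, _, lang in properties)
--
--     # Create a dictionary to store the languages for each property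
--     properties_without_translations = {}
--     for prop, _, lang in properties:
--         if prop not in properties_without_translations:
--             properties_without_translations[prop] = set()
--         properties_without_translations[prop].add(lang)
--
--     # Find properties that do not have translations in all languages
--     missing_translations = {}
--     for prop, langs in properties_without_translations.items():
--         missing_langs = languages - langs
--         for lang in missing_langs:
--             if lang not in missing_translations:
--                 missing_translations[lang] = set()
--             missing_translations[lang].add(prop)
--
--     return missing_translations
-- ===== SOURCE B (Python) =====
-- def get_properties_without_translations(properties):
--     # Index the present (property, language) pairs once, plus the two
--     # deduplicated universes; emit missing entries by scanning the
--     # prop x lang product with a single pair-membership test.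
--     pairs = {(prop, lang) for prop, _, lang in properties}
--     props = list(dict.fromkeys(prop for prop, _, lang in properties))
--     langs = list(dict.fromkeys(lang for _, _, lang in properties))
--     missing = {}
--     for prop in props:
--         for lang in langs:
--             if (prop, lang) in pairs:
--                 continue
--             missing.setdefault(lang, set()).add(prop)
--     return missing
-- ===== Notes on version B (the rewrite author's own statement) =====
-- stated objective: alternative
-- what changed: B builds one global set of present (property, language) pairs and the deduplicated property/language universes, then scans the property-by-language product with a single pair-membership test, instead of A's per-property language sets and per-property set subtraction.
import Mathlib
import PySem

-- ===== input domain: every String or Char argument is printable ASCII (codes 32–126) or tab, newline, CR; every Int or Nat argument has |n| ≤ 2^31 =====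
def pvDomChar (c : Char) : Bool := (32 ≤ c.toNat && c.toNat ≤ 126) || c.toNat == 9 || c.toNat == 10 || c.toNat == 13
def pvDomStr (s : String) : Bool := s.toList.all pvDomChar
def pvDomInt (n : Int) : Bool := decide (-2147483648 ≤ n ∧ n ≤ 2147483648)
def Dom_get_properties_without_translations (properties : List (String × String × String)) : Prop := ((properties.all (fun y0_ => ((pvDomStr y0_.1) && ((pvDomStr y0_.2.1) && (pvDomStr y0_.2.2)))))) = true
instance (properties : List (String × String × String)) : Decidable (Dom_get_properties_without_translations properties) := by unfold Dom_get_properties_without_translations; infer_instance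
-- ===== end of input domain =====

-- B replaces A's per-property language sets and per-property set subtraction by one global
-- set of present (property, language) pairs scanned over the property × language product;
-- same cost, different data structure (objective: alternative). Equality is proved on the
-- PySem representation (dicts in insertion order, sets in first-insertion order).

-- ===== PORT A =====
def get_properties_without_translations (properties : List (String × String × String)) : List (String × List String) :=
  -- languages = set(lang for _, _, lang in properties)
  let languages : PySem.Set String := PySem.Set.ofList (properties.map (fun t => t.2.2))
  -- for prop, _, lang: if prop not in d: d[prop] = set(); d[prop].add(lang)
  -- (the in-place d[prop].add(lang) is Dict.modify on the guaranteed-present key)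
  let pwt : PySem.Dict String (PySem.Set String) :=
    properties.foldl (fun d t =>
      (if d.contains t.1 then d else d.insert t.1 PySem.Set.empty).modify t.1 PySem.Set.empty
        (fun s => PySem.Set.add s t.2.2)) PySem.Dict.empty
  -- for prop, langs in pwt.items(): for lang in languages - langs: setdefault-and-add
  let mt : PySem.Dict String (PySem.Set String) :=
    pwt.items.foldl (fun m pl =>
      (PySem.Set.diff languages pl.2).foldl (fun m lang =>
        (if m.contains lang then m else m.insert lang PySem.Set.empty).modify lang PySem.Set.empty
          (fun s => PySem.Set.add s pl.1)) m) PySem.Dict.empty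
  mt.items

-- ===== PORT B =====
def get_properties_without_translations_alt (properties : List (String × String × String)) : List (String × List String) :=
  -- pairs = {(prop, lang) for prop, _, lang in properties}
  let pairs : PySem.Set (String × String) := PySem.Set.ofList (properties.map (fun t => (t.1, t.2.2)))
  -- props / langs = list(dict.fromkeys(...))
  let props : List String := PySem.List.dedup (properties.map (fun t => t.1))
  let langs : List String := PySem.List.dedup (properties.map (fun t => t.2.2))
  -- for prop in props: for lang in langs: if (prop, lang) in pairs: continue; missing.setdefault(lang, set()).add(prop)
  let missing : PySem.Dict String (PySem.Set String) :=
    props.foldl (fun m prop =>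
      langs.foldl (fun m lang =>
        if pairs.contains (prop, lang) then m
        else (m.setdefault lang PySem.Set.empty).modify lang PySem.Set.empty
          (fun s => PySem.Set.add s prop)) m) PySem.Dict.empty
  missing.items

-- ===== PRECONDITION & SPEC =====
def Spec_get_properties_without_translations (properties : List (String × String × String)) (out : List (String × List String)) : Prop := out = get_properties_without_translations_alt properties
instance (properties : List (String × String × String)) (out : List (String × List String)) : Decidable (Spec_get_properties_without_translations properties out) := by unfold Spec_get_properties_without_translations; infer_instance

-- ===== CLAIM (what is proved, stated in full; the proofs are below) =====
def Claim_equal_get_properties_without_translations : Prop := ∀ (properties : List (String × String × String)), Dom_get_properties_without_translations properties → Spec_get_properties_without_translations properties (get_properties_without_translations properties)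

-- ===== LEMMAS AND PROOFS =====

-- ensure-key-then-mutate collapses to a single modify
theorem ensure_modify {κ ν : Type} [BEq κ] [LawfulBEq κ] (m : PySem.Dict κ ν) (k : κ) (v0 : ν) (f : ν → ν) :
    (if m.contains k then m else m.insert k v0).modify k v0 f = m.modify k v0 f := by
  by_cases h : m.contains k
  · simp [h]
  · simp only [Bool.not_eq_true] at h
    simp [h, PySem.Dict.modify, PySem.Dict.getD_insert_self, PySem.Dict.insert_insert_self,
      PySem.Dict.getD_of_not_contains _ _ h]

-- setdefault-then-mutate collapses to a single modify
theorem setdefault_modify {κ ν : Type} [BEq κ] [LawfulBEq κ] (m : PySem.Dict κ ν) (k : κ) (v0 : ν) (f : ν → ν) :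
    (m.setdefault k v0).modify k v0 f = m.modify k v0 f := by
  by_cases h : m.contains k
  · simp [PySem.Dict.setdefault_of_contains _ _ h]
  · simp only [Bool.not_eq_true] at h
    simp [PySem.Dict.setdefault_of_not_contains _ _ h, PySem.Dict.modify,
      PySem.Dict.getD_insert_self, PySem.Dict.insert_insert_self,
      PySem.Dict.getD_of_not_contains _ _ h]

-- value stored for key p by A's grouping loop
theorem build_getD (l : List (String × String × String)) (d : PySem.Dict String (PySem.Set String)) (p : String) :
    (l.foldl (fun d t => d.modify t.1 PySem.Set.empty (fun s => PySem.Set.add s t.2.2)) d).getD p PySem.Set.empty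
      = PySem.Set.update (d.getD p PySem.Set.empty) ((l.filter (fun t => t.1 == p)).map (fun t => t.2.2)) := by
  induction l generalizing d with
  | nil => simp [PySem.Set.update]
  | cons t l ih =>
    by_cases hp : t.1 = p
    · subst hp
      simp only [List.foldl_cons, ih, List.filter_cons, beq_self_eq_true, if_pos,
        List.map_cons, PySem.Dict.getD_modify_self, PySem.Set.update_cons]
    · simp only [List.foldl_cons, ih, List.filter_cons]
      rw [PySem.Dict.getD_modify_of_ne _ _ _ (Ne.symm hp)]
      simp [hp]

-- membership in that stored set is presence of the (prop, lang) pair in the input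
theorem build_mem (properties : List (String × String × String)) (p lang : String) :
    (lang ∈ (properties.foldl (fun d t => d.modify t.1 PySem.Set.empty (fun s => PySem.Set.add s t.2.2)) PySem.Dict.empty).getD p PySem.Set.empty)
      ↔ (p, lang) ∈ properties.map (fun t => (t.1, t.2.2)) := by
  rw [build_getD]
  simp only [PySem.Dict.getD_empty, PySem.Set.mem_update, List.mem_map, List.mem_filter, beq_iff_eq]
  constructor
  · rintro (h | ⟨t, ⟨ht, hp⟩, hl⟩)
    · cases h
    · exact ⟨t, ht, by simp [hp, hl]⟩
  · rintro ⟨t, ht, he⟩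
    exact Or.inr ⟨t, ⟨ht, congrArg Prod.fst he⟩, congrArg Prod.snd he⟩

theorem get_properties_without_translations_eq (properties : List (String × String × String)) :
    get_properties_without_translations properties = get_properties_without_translations_alt properties := by
  unfold get_properties_without_translations get_properties_without_translations_alt
  simp only []
  -- collapse A's guarded insert to modify
  have hbody : (fun (d : PySem.Dict String (PySem.Set String)) (t : String × String × String) =>
      (if d.contains t.1 then d else d.insert t.1 PySem.Set.empty).modify t.1 PySem.Set.empty
        (fun s => PySem.Set.add s t.2.2))
      = fun d t => d.modify t.1 PySem.Set.empty (fun s => PySem.Set.add s t.2.2) := by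
    funext d t; exact ensure_modify d t.1 PySem.Set.empty _
  rw [hbody]
  set pwt := properties.foldl (fun d t => d.modify t.1 PySem.Set.empty (fun s => PySem.Set.add s t.2.2)) PySem.Dict.empty with hpwt
  -- keys of pwt are the deduplicated props, with no duplicates
  have hkeys : pwt.keys = PySem.List.dedup (properties.map (fun t => t.1)) := by
    rw [hpwt, PySem.Dict.keys_foldl_modify_key properties (fun t => t.1) PySem.Set.empty
      (fun _ t => fun s => PySem.Set.add s t.2.2) PySem.Dict.empty]
    simp [PySem.Dict.keys_empty, PySem.Set.update, PySem.List.dedup, PySem.Set.ofList_eq_foldl]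
  have hnd : pwt.keys.Nodup := by
    rw [hpwt]
    exact PySem.Dict.nodup_keys_foldl_modify_key properties (fun t => t.1) PySem.Set.empty
      (fun _ t => fun s => PySem.Set.add s t.2.2) PySem.Dict.empty PySem.Dict.nodup_keys_empty
  rw [PySem.Dict.items_eq_map_keys pwt hnd PySem.Set.empty, hkeys, List.foldl_map]
  refine congrArg PySem.Dict.items ?_
  apply PySem.List.foldl_congr_mem
  intro m p _
  dsimp only
  -- collapse both inner-loop bodies to a single modify
  have hA : (fun (m : PySem.Dict String (PySem.Set String)) (lang : String) =>
      (if m.contains lang then m else m.insert lang PySem.Set.empty).modify lang PySem.Set.empty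
        (fun s => PySem.Set.add s p))
      = fun m lang => m.modify lang PySem.Set.empty (fun s => PySem.Set.add s p) := by
    funext m lang; exact ensure_modify m lang PySem.Set.empty _
  rw [hA]
  have hB : (fun (m : PySem.Dict String (PySem.Set String)) (lang : String) =>
      if PySem.Set.contains (PySem.Set.ofList (properties.map (fun t => (t.1, t.2.2)))) (p, lang) then m
      else (m.setdefault lang PySem.Set.empty).modify lang PySem.Set.empty (fun s => PySem.Set.add s p))
      = fun m lang =>
        if (!PySem.Set.contains (PySem.Set.ofList (properties.map (fun t => (t.1, t.2.2)))) (p, lang)) = true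
        then m.modify lang PySem.Set.empty (fun s => PySem.Set.add s p) else m := by
    funext m lang
    rw [setdefault_modify]
    cases h : PySem.Set.contains (PySem.Set.ofList (properties.map (fun t => (t.1, t.2.2)))) (p, lang) <;> simp
  rw [hB, ← List.foldl_filter]
  -- the two filtered language lists coincide
  congr 1
  show PySem.Set.diff (PySem.Set.ofList (properties.map (fun t => t.2.2))) (pwt.getD p PySem.Set.empty)
      = List.filter _ (PySem.List.dedup (properties.map (fun t => t.2.2)))
  rw [PySem.Set.diff, PySem.List.dedup]
  apply List.filter_congr
  intro lang _
  congr 1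
  rw [Bool.eq_iff_iff, PySem.Set.contains_iff, PySem.Set.contains_iff, hpwt]
  rw [build_mem, PySem.Set.mem_ofList]

-- ===== VERDICT (by name: the statement is the Claim_ definition above) =====
theorem get_properties_without_translations_spec : Claim_equal_get_properties_without_translations := by
  intro properties _
  exact get_properties_without_translations_eq properties
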